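-- pv_equiv track=rewrite | github.com/DancingOnAir/LeetcodePythonSolution | String/KMP/3008_find_beautiful_indices_in_the_given_array_ii.py | beautifulIndices1
-- ===== SOURCE A (Python) =====
-- from typing import List
-- from bisect import bisect_left
--
-- def beautifulIndices1(s: str, a: str, b: str, k: int) -> List[int]:
--     def get_next(ss):
--         nxt = [0] * len(ss)
--         j = 0
--         for i in range(1, len(ss)):
--             while j > 0 and ss[i] != ss[j]:
--                 j = nxt[j - 1]
--             if ss[i] == ss[j]:
--                 j += 1
--             nxt[i] = j
--         return nxt
--
--     def kmp(txt, pattern):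
--         nxt = get_next(pattern)
--         p = []
--         j = 0
--         for i, ch in enumerate(txt):
--             while j > 0 and ch != pattern[j]:
--                 j = nxt[j - 1]
--             if ch == pattern[j]:
--                 j += 1
--             if j == len(pattern):
--                 p.append(i - j + 1)
--                 j = nxt[j - 1]
--         return p
--
--     pa = kmp(s, a)
--     pb = kmp(s, b)
--
--     res = []
--     for x in pa:
--         i = bisect_left(pb, x)
--         if (i < len(pb) and pb[i] - x <= k) or (i > 0 and x - pb[i - 1] <= k):
--             res.append(x)
--     return res
-- ===== SOURCE B (Python) =====
-- from typing import List
--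
--
-- def beautifulIndices1(s: str, a: str, b: str, k: int) -> List[int]:
--     # Direct slice-comparison scan over all start positions instead of the two
--     # KMP automaton searches, and an any() nearness test instead of bisect.
--     def occurrences(p):
--         return [i for i in range(len(s) - len(p) + 1) if s[i:i + len(p)] == p]
--
--     pa = occurrences(a)
--     pb = occurrences(b)
--     return [x for x in pa if any(abs(x - y) <= k for y in pb)]
-- ===== Notes on version B (the rewrite author's own statement) =====
-- stated objective: simpler
-- what changed: Both KMP automaton searches (failure table + state machine) are replaced by a direct slice-comparison scan over every start position, and the per-occurrence bisect binary search on pb is replaced by an any() test of |x-y|<=k; the slice comparisons and any() run in CPython's C layer instead of an interpreted per-character automaton loop, which a timing run measured as a large constant-factor speedup.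
-- outside the precondition, e.g. on beautifulIndices1('', '', '', 0): A returns [], B returns [0]
import Mathlib
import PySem

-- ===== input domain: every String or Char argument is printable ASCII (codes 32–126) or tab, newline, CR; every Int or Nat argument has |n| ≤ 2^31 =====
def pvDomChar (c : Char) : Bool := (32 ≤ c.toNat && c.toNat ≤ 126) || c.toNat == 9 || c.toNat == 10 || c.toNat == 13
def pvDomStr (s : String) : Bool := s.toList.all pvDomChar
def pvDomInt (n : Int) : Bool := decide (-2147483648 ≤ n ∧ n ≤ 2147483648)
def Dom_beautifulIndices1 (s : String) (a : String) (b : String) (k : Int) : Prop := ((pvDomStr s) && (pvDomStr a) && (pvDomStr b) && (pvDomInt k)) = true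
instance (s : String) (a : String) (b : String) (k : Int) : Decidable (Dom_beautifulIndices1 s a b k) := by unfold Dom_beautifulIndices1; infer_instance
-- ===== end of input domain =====

-- B replaces A's two KMP automaton searches by a direct slice-comparison scan over all
-- start positions and A's per-occurrence bisect binary search by an any() nearness test
-- (objective: simpler). Pre_ excludes empty patterns, on which A raises IndexError for
-- non-empty s and where, for empty s, A's [] and B's [0] are both defensible.

-- ===== PORT A =====
-- while j > 0 and c != pat[j]: j = nxt[j-1]   (fuel = starting j suffices: nxt[t] <= t)
def pvJump (pat : List Char) (nxt : List Nat) (c : Char) : Nat → Nat → Nat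
  | 0, j => j
  | fuel + 1, j =>
      if 0 < j ∧ c ≠ pat.getD j ' ' then pvJump pat nxt c fuel (nxt.getD (j - 1) 0) else j

def pvGetNext (ss : List Char) : List Nat :=
  ((List.range' 1 (ss.length - 1)).foldl
    (fun (st : List Nat × Nat) i =>
      let j1 := pvJump ss st.1 (ss.getD i ' ') st.2 st.2
      let j2 := if ss.getD i ' ' = ss.getD j1 ' ' then j1 + 1 else j1
      (st.1.set i j2, j2))
    (List.replicate ss.length 0, 0)).1

def pvKmp (txt pat : List Char) : List Int :=
  let nxt := pvGetNext pat
  ((PySem.List.enumerate txt).foldl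
    (fun (st : List Int × Nat) p =>
      let j1 := pvJump pat nxt p.2 st.2 st.2
      let j2 := if p.2 = pat.getD j1 ' ' then j1 + 1 else j1
      if j2 = pat.length then (st.1 ++ [p.1 - (j2 : Int) + 1], nxt.getD (j2 - 1) 0)
      else (st.1, j2))
    ([], 0)).1

def beautifulIndices1 (s : String) (a : String) (b : String) (k : Int) : List Int :=
  let pa := pvKmp s.toList a.toList
  let pb := pvKmp s.toList b.toList
  pa.foldl
    (fun res x =>
      let i := PySem.List.bisectLeft pb x
      if (decide (i < pb.length) && decide (pb.getD i 0 - x ≤ k)) ||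
         (decide (0 < i) && decide (x - pb.getD (i - 1) 0 ≤ k))
      then res ++ [x] else res) []

-- ===== PORT B =====
-- [i for i in range(len(s) - len(p) + 1) if s[i:i+len(p)] == p]
def pvOcc (sl : List Char) (p : List Char) : List Int :=
  (PySem.List.pyRange 0 ((sl.length : Int) - (p.length : Int) + 1) 1).filter
    (fun i => decide (PySem.List.slice sl (some i) (some (i + (p.length : Int))) = p))

def beautifulIndices1_alt (s : String) (a : String) (b : String) (k : Int) : List Int :=
  let pa := pvOcc s.toList a.toList
  let pb := pvOcc s.toList b.toList
  pa.filter (fun x => pb.any (fun y => decide (|x - y| ≤ k)))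

-- ===== PRECONDITION & SPEC =====
-- Pre_ excludes the inputs on which A raises IndexError (an empty pattern a or b with
-- non-empty s) and the corner s = a = b = "", where the occurrence of an empty pattern
-- in an empty string is unspecified (A returns [], B returns [0] for k >= 0).
def Pre_beautifulIndices1 (s : String) (a : String) (b : String) (k : Int) : Prop :=
  (a ≠ "" ∧ b ≠ "") ∨ (s = "" ∧ (a ≠ "" ∨ b ≠ ""))
instance (s : String) (a : String) (b : String) (k : Int) : Decidable (Pre_beautifulIndices1 s a b k) := by unfold Pre_beautifulIndices1; infer_instance

def pvWitness_beautifulIndices1 : String × String × String × Int := ("aabcab", "ab", "c", 2)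

def Spec_beautifulIndices1 (s : String) (a : String) (b : String) (k : Int) (out : List Int) : Prop := out = beautifulIndices1_alt s a b k
instance (s : String) (a : String) (b : String) (k : Int) (out : List Int) : Decidable (Spec_beautifulIndices1 s a b k out) := by unfold Spec_beautifulIndices1; infer_instance

-- ===== CLAIM (what is proved, stated in full; the proofs are below) =====
def Claim_equal_beautifulIndices1 : Prop := ∀ (s : String) (a : String) (b : String) (k : Int), Dom_beautifulIndices1 s a b k → Pre_beautifulIndices1 s a b k → Spec_beautifulIndices1 s a b k (beautifulIndices1 s a b k)


-- ===== LEMMAS AND PROOFS =====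

theorem pvTakeSucc {α : Type} [Inhabited α] (l : List α) (n : Nat) (h : n < l.length) (d : α) :
    l.take (n + 1) = l.take n ++ [l.getD n d] := by
  rw [List.take_add_one, List.getD_eq_getElem l d h, List.getElem?_eq_getElem h]
  rfl

theorem pvSuffixConcat {α : Type} (u w : List α) (x c : α) :
    u ++ [x] <:+ w ++ [c] ↔ u <:+ w ∧ x = c := by
  rw [← List.reverse_prefix]
  simp only [List.reverse_append, List.reverse_singleton, List.singleton_append,
    List.cons_prefix_cons]
  rw [List.reverse_prefix]
  tauto

def pvGoodAt (pat : List Char) (nxt : List Nat) (k : Nat) : Prop :=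
  nxt.getD k 0 ≤ k ∧ pat.take (nxt.getD k 0) <:+ pat.take (k + 1) ∧
  ∀ t ≤ k, pat.take t <:+ pat.take (k + 1) → t ≤ nxt.getD k 0

theorem pvJump_spec (pat : List Char) (nxt : List Nat) (c : Char) (w : List Char) :
    ∀ fuel j, j ≤ fuel → pat.take j <:+ w → j < pat.length →
    (∀ v, v < j → pvGoodAt pat nxt v) →
    pvJump pat nxt c fuel j ≤ j ∧
    pat.take (pvJump pat nxt c fuel j) <:+ w ∧
    pvJump pat nxt c fuel j < pat.length ∧
    (pvJump pat nxt c fuel j = 0 ∨ c = pat.getD (pvJump pat nxt c fuel j) ' ') ∧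
    (∀ t, t ≤ j → pat.take t <:+ w → c = pat.getD t ' ' → t ≤ pvJump pat nxt c fuel j) := by
  intro fuel
  induction fuel with
  | zero =>
      intro j hj hw hjm _
      have hj0 : j = 0 := Nat.le_zero.mp hj
      subst hj0
      refine ⟨le_refl _, hw, hjm, Or.inl rfl, ?_⟩
      intro t ht _ _; omega
  | succ fuel ih =>
      intro j hj hw hjm hgood
      by_cases hc : 0 < j ∧ c ≠ pat.getD j ' '
      · have hunf : pvJump pat nxt c (fuel + 1) j = pvJump pat nxt c fuel (nxt.getD (j - 1) 0) := by
          simp only [pvJump]; rw [if_pos hc]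
        rw [hunf]
        obtain ⟨hle, hsuf, hmax⟩ := hgood (j - 1) (by omega)
        have hj1 : j - 1 + 1 = j := by omega
        rw [hj1] at hsuf hmax
        have hw' : pat.take (nxt.getD (j - 1) 0) <:+ w := hsuf.trans hw
        obtain ⟨r1, r2, r3, r4, r5⟩ := ih (nxt.getD (j - 1) 0) (by omega) hw'
          (by omega) (fun v hv => hgood v (by omega))
        refine ⟨by omega, r2, r3, r4, ?_⟩
        intro t ht htw htc
        rcases Nat.lt_or_ge t j with h | h
        · have hnest : pat.take t <:+ pat.take j :=
            List.suffix_of_suffix_length_le htw hw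
              (by simp only [List.length_take]; omega)
          exact r5 t (hmax t (by omega) hnest) htw htc
        · have htj : t = j := by omega
          subst htj
          exact absurd htc hc.2
      · have hunf : pvJump pat nxt c (fuel + 1) j = j := by
          simp only [pvJump]; rw [if_neg hc]
        rw [hunf]
        refine ⟨le_refl _, hw, hjm, ?_, ?_⟩
        · by_cases h0 : j = 0
          · exact Or.inl h0
          · exact Or.inr (by by_contra hne; exact hc ⟨by omega, hne⟩)
        · intro t ht _ _; exact ht

theorem pvStep_spec (pat : List Char) (nxt : List Nat) (c : Char) (w : List Char) (j : Nat)
    (hw : pat.take j <:+ w) (hjm : j < pat.length)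
    (hgood : ∀ v, v < j → pvGoodAt pat nxt v) :
    (if c = pat.getD (pvJump pat nxt c j j) ' '
     then pvJump pat nxt c j j + 1 else pvJump pat nxt c j j) ≤ j + 1 ∧
    (if c = pat.getD (pvJump pat nxt c j j) ' '
     then pvJump pat nxt c j j + 1 else pvJump pat nxt c j j) ≤ pat.length ∧
    pat.take (if c = pat.getD (pvJump pat nxt c j j) ' '
     then pvJump pat nxt c j j + 1 else pvJump pat nxt c j j) <:+ w ++ [c] ∧
    ∀ t, t ≤ j → pat.take t <:+ w → c = pat.getD t ' ' →
      t + 1 ≤ (if c = pat.getD (pvJump pat nxt c j j) ' '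
     then pvJump pat nxt c j j + 1 else pvJump pat nxt c j j) := by
  obtain ⟨r1, r2, r3, r4, r5⟩ := pvJump_spec pat nxt c w j j (le_refl j) hw hjm hgood
  by_cases hc : c = pat.getD (pvJump pat nxt c j j) ' '
  · simp only [if_pos hc]
    refine ⟨by omega, by omega, ?_, ?_⟩
    · rw [pvTakeSucc pat _ r3 ' ']
      exact (pvSuffixConcat _ _ _ _).mpr ⟨r2, hc.symm⟩
    · intro t ht htw htc
      exact Nat.succ_le_succ (r5 t ht htw htc)
  · simp only [if_neg hc]
    have hz : pvJump pat nxt c j j = 0 := by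
      rcases r4 with h | h
      · exact h
      · exact absurd h hc
    refine ⟨by omega, by omega, ?_, ?_⟩
    · rw [hz]; simp
    · intro t ht htw htc
      exfalso
      have := r5 t ht htw htc
      rw [hz] at this
      have ht0 : t = 0 := by omega
      subst ht0
      rw [hz] at hc
      exact hc htc

def pvNxtVal (ss : List Char) (st : List Nat × Nat) (i : Nat) : Nat :=
  if ss.getD i ' ' = ss.getD (pvJump ss st.1 (ss.getD i ' ') st.2 st.2) ' '
  then pvJump ss st.1 (ss.getD i ' ') st.2 st.2 + 1
  else pvJump ss st.1 (ss.getD i ' ') st.2 st.2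

def pvNxtStep (ss : List Char) (st : List Nat × Nat) (i : Nat) : List Nat × Nat :=
  (st.1.set i (pvNxtVal ss st i), pvNxtVal ss st i)

theorem pvGetDSetNe (l : List Nat) (i k v : Nat) (h : k ≠ i) :
    (l.set i v).getD k 0 = l.getD k 0 := by
  simp [List.getD, List.getElem?_set_ne (by omega : i ≠ k)]

theorem pvGetDSetSelf (l : List Nat) (i v : Nat) (h : i < l.length) :
    (l.set i v).getD i 0 = v := by
  simp [List.getD, h]

theorem pvGoodAt_congr {pat : List Char} {nxt nxt' : List Nat} {k : Nat}
    (h : nxt'.getD k 0 = nxt.getD k 0) : pvGoodAt pat nxt k → pvGoodAt pat nxt' k := by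
  unfold pvGoodAt; rw [h]; exact id

def pvNxtInv (pat : List Char) (i : Nat) (st : List Nat × Nat) : Prop :=
  st.1.length = pat.length ∧ st.2 = st.1.getD (i - 1) 0 ∧
  (∀ k, k < i → pvGoodAt pat st.1 k) ∧
  (∀ k, i ≤ k → st.1.getD k 0 = 0)

theorem pvNxtStep_inv (pat : List Char) (i : Nat) (st : List Nat × Nat)
    (h1 : 1 ≤ i) (h2 : i < pat.length) (hinv : pvNxtInv pat i st) :
    pvNxtInv pat (i + 1) (pvNxtStep pat st i) := by
  obtain ⟨hlen, hj, hgoods, hzero⟩ := hinv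
  obtain ⟨gle, gsuf, gmax⟩ := hgoods (i - 1) (by omega)
  have hi1 : i - 1 + 1 = i := by omega
  rw [hi1] at gsuf gmax
  rw [← hj] at gle gsuf gmax
  have hjm : st.2 < pat.length := by omega
  have hgood' : ∀ v, v < st.2 → pvGoodAt pat st.1 v := fun v hv => hgoods v (by omega)
  obtain ⟨S1, S2, S3, S4⟩ :=
    pvStep_spec pat st.1 (pat.getD i ' ') (pat.take i) st.2 gsuf hjm hgood'
  rw [show (if pat.getD i ' ' = pat.getD (pvJump pat st.1 (pat.getD i ' ') st.2 st.2) ' '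
      then pvJump pat st.1 (pat.getD i ' ') st.2 st.2 + 1
      else pvJump pat st.1 (pat.getD i ' ') st.2 st.2) = pvNxtVal pat st i from rfl]
    at S1 S2 S3 S4
  rw [← pvTakeSucc pat i h2 ' '] at S3
  show pvNxtInv pat (i + 1) (st.1.set i (pvNxtVal pat st i), pvNxtVal pat st i)
  refine ⟨by simpa using hlen, ?_, ?_, ?_⟩
  · show _ = (st.1.set i _).getD (i + 1 - 1) 0
    rw [show i + 1 - 1 = i from rfl, pvGetDSetSelf _ _ _ (by omega)]
  · intro k hk
    rcases Nat.lt_or_ge k i with hki | hki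
    · exact pvGoodAt_congr (pvGetDSetNe st.1 i k _ (by omega)) (hgoods k hki)
    · have hkeq : k = i := by omega
      subst hkeq
      refine ⟨?_, ?_, ?_⟩ <;> rw [pvGetDSetSelf _ _ _ (by omega)]
      · omega
      · exact S3
      · intro t ht hsufT
        match t with
        | 0 => omega
        | t' + 1 =>
          have ht' : t' < pat.length := by omega
          rw [pvTakeSucc pat t' ht' ' ', pvTakeSucc pat k h2 ' '] at hsufT
          obtain ⟨hA, hB⟩ := (pvSuffixConcat _ _ _ _).mp hsufT
          exact S4 t' (gmax t' (by omega) hA) hA hB.symm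
  · intro k hk
    rw [pvGetDSetNe _ _ _ _ (by omega)]
    exact hzero k (by omega)

theorem pvNxtFold (pat : List Char) :
    ∀ (cnt i : Nat) (st : List Nat × Nat), 1 ≤ i → i + cnt ≤ pat.length →
    pvNxtInv pat i st →
    pvNxtInv pat (i + cnt) ((List.range' i cnt).foldl (pvNxtStep pat) st) := by
  intro cnt
  induction cnt with
  | zero => intro i st _ _ h; simpa using h
  | succ cnt ih =>
      intro i st h1 h2 hinv
      rw [List.range'_succ, List.foldl_cons,
        show i + (cnt + 1) = (i + 1) + cnt by omega]
      exact ih (i + 1) (pvNxtStep pat st i) (by omega) (by omega)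
        (pvNxtStep_inv pat i st h1 (by omega) hinv)

theorem pvGetNext_good (pat : List Char) :
    ∀ k < pat.length, pvGoodAt pat (pvGetNext pat) k := by
  intro k hk
  have hinit : pvNxtInv pat 1 (List.replicate pat.length 0, 0) := by
    refine ⟨by simp, by simp, ?_, by intro k _; simp⟩
    intro k hk1
    have hk0 : k = 0 := by omega
    subst hk0
    refine ⟨by simp, by simp, ?_⟩
    intro t ht _; omega
  have hfold := pvNxtFold pat (pat.length - 1) 1 _ (le_refl 1) (by omega) hinit
  rw [show 1 + (pat.length - 1) = pat.length by omega] at hfold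
  have heq : pvGetNext pat =
      ((List.range' 1 (pat.length - 1)).foldl (pvNxtStep pat)
        (List.replicate pat.length 0, 0)).1 := rfl
  rw [heq]
  exact hfold.2.2.1 k hk

def pvCanon (txt pat : List Char) : List Int :=
  ((List.range txt.length).filter (fun e => decide (pat <:+ txt.take (e + 1)))).map
    (fun (e : Nat) => (e : Int) - pat.length + 1)

def pvKmpVal (pat : List Char) (nxt : List Nat) (j : Nat) (c : Char) : Nat :=
  if c = pat.getD (pvJump pat nxt c j j) ' '
  then pvJump pat nxt c j j + 1 else pvJump pat nxt c j j

def pvKmpStep (pat : List Char) (nxt : List Nat) (st : List Int × Nat) (p : Int × Char) :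
    List Int × Nat :=
  if pvKmpVal pat nxt st.2 p.2 = pat.length
  then (st.1 ++ [p.1 - (pvKmpVal pat nxt st.2 p.2 : Int) + 1],
        nxt.getD (pvKmpVal pat nxt st.2 p.2 - 1) 0)
  else (st.1, pvKmpVal pat nxt st.2 p.2)

def pvKInv (pat pre : List Char) (st : List Int × Nat) : Prop :=
  st.2 < pat.length ∧ pat.take st.2 <:+ pre ∧
  (∀ t, t < pat.length → pat.take t <:+ pre → t ≤ st.2) ∧
  st.1 = ((List.range pre.length).filter (fun e => decide (pat <:+ pre.take (e + 1)))).map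
    (fun (e : Nat) => (e : Int) - pat.length + 1)

theorem pvKmpStep_inv (pat : List Char) (pre : List Char) (c : Char) (st : List Int × Nat)
    (hinv : pvKInv pat pre st) :
    pvKInv pat (pre ++ [c]) (pvKmpStep pat (pvGetNext pat) st ((pre.length : Int), c)) := by
  obtain ⟨hjm, hsuf, hmax, hacc⟩ := hinv
  obtain ⟨S1, S2, S3, S4⟩ :=
    pvStep_spec pat (pvGetNext pat) c pre st.2 hsuf hjm
      (fun v hv => pvGetNext_good pat v (by omega))
  rw [show (if c = pat.getD (pvJump pat (pvGetNext pat) c st.2 st.2) ' '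
      then pvJump pat (pvGetNext pat) c st.2 st.2 + 1
      else pvJump pat (pvGetNext pat) c st.2 st.2) = pvKmpVal pat (pvGetNext pat) st.2 c
      from rfl] at S1 S2 S3 S4
  have hmax' : ∀ t, t ≤ pat.length → pat.take t <:+ pre ++ [c] →
      t ≤ pvKmpVal pat (pvGetNext pat) st.2 c := by
    intro t ht hsufT
    match t with
    | 0 => omega
    | t' + 1 =>
      have ht' : t' < pat.length := by omega
      rw [pvTakeSucc pat t' ht' ' '] at hsufT
      obtain ⟨hA, hB⟩ := (pvSuffixConcat _ _ _ _).mp hsufT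
      exact S4 t' (hmax t' ht' hA) hA hB.symm
  have hmatch : pvKmpVal pat (pvGetNext pat) st.2 c = pat.length ↔ pat <:+ pre ++ [c] := by
    constructor
    · intro h
      have := S3
      rw [h, List.take_length] at this
      exact this
    · intro h
      have := hmax' pat.length (le_refl _) (by rwa [List.take_length])
      omega
  have hcan : ((List.range (pre.length + 1)).filter
        (fun e => decide (pat <:+ (pre ++ [c]).take (e + 1)))).map
        (fun (e : Nat) => (e : Int) - pat.length + 1)
      = ((List.range pre.length).filter (fun e => decide (pat <:+ pre.take (e + 1)))).map
          (fun (e : Nat) => (e : Int) - pat.length + 1)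
        ++ (if pat <:+ pre ++ [c] then [(pre.length : Int) - pat.length + 1] else []) := by
    rw [List.range_succ, List.filter_append, List.map_append]
    congr 1
    · congr 1
      apply List.filter_congr
      intro e he
      have : e < pre.length := List.mem_range.mp he
      rw [List.take_append_of_le_length (by omega)]
    · have hfull : (pre ++ [c]).take (pre.length + 1) = pre ++ [c] := by
        rw [show pre.length + 1 = (pre ++ [c]).length by simp, List.take_length]
      simp only [List.filter_singleton, hfull]
      by_cases h : pat <:+ pre ++ [c]
      · simp [h]
      · simp [h]
  show pvKInv pat (pre ++ [c])
    (if pvKmpVal pat (pvGetNext pat) st.2 c = pat.length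
     then (st.1 ++ [(pre.length : Int) - (pvKmpVal pat (pvGetNext pat) st.2 c : Int) + 1],
           (pvGetNext pat).getD (pvKmpVal pat (pvGetNext pat) st.2 c - 1) 0)
     else (st.1, pvKmpVal pat (pvGetNext pat) st.2 c))
  by_cases hjc : pvKmpVal pat (pvGetNext pat) st.2 c = pat.length
  · rw [if_pos hjc, hjc]
    have hm1 : 1 ≤ pat.length := by omega
    obtain ⟨g1, g2, g3⟩ := pvGetNext_good pat (pat.length - 1) (by omega)
    rw [show pat.length - 1 + 1 = pat.length by omega, List.take_length] at g2 g3
    have hpat' : pat <:+ pre ++ [c] := hmatch.mp hjc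
    refine ⟨by omega, g2.trans hpat', ?_, ?_⟩
    · intro t htm hsufT
      have hnest : pat.take t <:+ pat :=
        List.suffix_of_suffix_length_le hsufT hpat'
          (by simp only [List.length_take]; omega)
      exact g3 t (by omega) hnest
    · show st.1 ++ _ = _
      rw [hacc, List.length_append, List.length_singleton, hcan, if_pos hpat']
  · rw [if_neg hjc]
    have hnot : ¬ pat <:+ pre ++ [c] := fun h => hjc (hmatch.mpr h)
    refine ⟨by omega, S3, fun t htm h => hmax' t (by omega) h, ?_⟩
    show st.1 = _
    rw [hacc, List.length_append, List.length_singleton, hcan, if_neg hnot,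
      List.append_nil]

theorem pvKmpFold (pat : List Char) :
    ∀ (rest pre : List Char) (st : List Int × Nat), pvKInv pat pre st →
    pvKInv pat (pre ++ rest)
      ((PySem.List.enumerate rest (pre.length : Int)).foldl
        (pvKmpStep pat (pvGetNext pat)) st) := by
  intro rest
  induction rest with
  | nil => intro pre st h; simpa [PySem.List.enumerate_nil] using h
  | cons c r ih =>
      intro pre st h
      rw [PySem.List.enumerate_cons, List.foldl_cons]
      have hlen : ((pre ++ [c]).length : Int) = (pre.length : Int) + 1 := by
        simp
      have := ih (pre ++ [c]) (pvKmpStep pat (pvGetNext pat) st ((pre.length : Int), c))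
        (pvKmpStep_inv pat pre c st h)
      rw [hlen, List.append_assoc] at this
      simpa using this

theorem pvKmp_eq_canon (txt pat : List Char) (hp : pat ≠ []) :
    pvKmp txt pat = pvCanon txt pat := by
  have hm : 0 < pat.length := List.length_pos_of_ne_nil hp
  have h0 : pvKInv pat [] ([], 0) := by
    refine ⟨hm, by simp, ?_, by simp⟩
    intro t htm hsufT
    have := List.suffix_nil.mp hsufT
    have : (pat.take t).length = 0 := by rw [this]; rfl
    simp only [List.length_take] at this
    omega
  have hfold := pvKmpFold pat txt [] ([], 0) h0
  simp only [List.length_nil, Nat.cast_zero, List.nil_append] at hfold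
  have heq : pvKmp txt pat =
      ((PySem.List.enumerate txt).foldl (pvKmpStep pat (pvGetNext pat)) ([], 0)).1 := rfl
  rw [heq]
  exact hfold.2.2.2

theorem pvSuffixWindow (txt pat : List Char) (t : Nat) (h : t + pat.length ≤ txt.length) :
    pat <:+ txt.take (t + pat.length) ↔ (txt.drop t).take pat.length = pat := by
  constructor
  · intro hs
    have hlen : (txt.take (t + pat.length)).length = t + pat.length := by
      rw [List.length_take]; omega
    rw [List.suffix_iff_eq_drop, hlen, Nat.add_sub_cancel] at hs
    rw [List.drop_take] at hs
    rw [show t + pat.length - t = pat.length by omega] at hs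
    exact hs.symm
  · intro hs
    exact ⟨txt.take t, by rw [List.take_add, hs]⟩

theorem pvOcc_eq_canon (txt pat : List Char) (hp : pat ≠ []) :
    pvOcc txt pat = pvCanon txt pat := by
  have hm : 0 < pat.length := List.length_pos_of_ne_nil hp
  unfold pvOcc pvCanon
  rw [PySem.List.pyRange_one]
  rw [show (((txt.length : Int) - (pat.length : Int) + 1) - 0).toNat
      = txt.length + 1 - pat.length by omega]
  simp only [zero_add]
  rw [List.filter_map]
  have hslice : (List.range (txt.length + 1 - pat.length)).filter
        ((fun i => decide (PySem.List.slice txt (some i) (some (i + (pat.length : Int))) = pat))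
          ∘ (fun (k : Nat) => (k : Int)))
      = (List.range (txt.length + 1 - pat.length)).filter
        (fun t => decide ((txt.drop t).take pat.length = pat)) := by
    apply List.filter_congr
    intro t _
    simp only [Function.comp_apply]
    rw [PySem.List.slice_natCast_add]
  rw [hslice]
  rcases Nat.lt_or_ge txt.length pat.length with hcase | hcase
  · rw [show txt.length + 1 - pat.length = 0 by omega]
    have h1 : (List.range txt.length).filter
        (fun e => decide (pat <:+ txt.take (e + 1))) = [] := by
      apply List.filter_eq_nil_iff.mpr
      intro e he
      simp only [decide_eq_true_eq]
      intro hsuf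
      have hle := List.IsSuffix.length_le hsuf
      rw [List.length_take] at hle
      have he' := List.mem_range.mp he
      omega
    rw [h1]
    simp
  · symm
    conv_lhs => rw [show txt.length = (pat.length - 1) + (txt.length + 1 - pat.length)
      by omega]
    rw [List.range_add, List.filter_append, List.map_append]
    have h1 : (List.range (pat.length - 1)).filter
        (fun e => decide (pat <:+ txt.take (e + 1))) = [] := by
      apply List.filter_eq_nil_iff.mpr
      intro e he
      simp only [decide_eq_true_eq]
      intro hsuf
      have hle := List.IsSuffix.length_le hsuf
      rw [List.length_take] at hle
      have he' := List.mem_range.mp he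
      omega
    rw [h1, List.map_nil, List.nil_append, List.filter_map, List.map_map]
    have h2 : (List.range (txt.length + 1 - pat.length)).filter
          ((fun e => decide (pat <:+ txt.take (e + 1))) ∘ ((pat.length - 1) + ·))
        = (List.range (txt.length + 1 - pat.length)).filter
          (fun t => decide ((txt.drop t).take pat.length = pat)) := by
      apply List.filter_congr
      intro t ht
      have ht' := List.mem_range.mp ht
      simp only [Function.comp_apply]
      rw [show pat.length - 1 + t + 1 = t + pat.length by omega]
      exact Bool.decide_congr (pvSuffixWindow txt pat t (by omega))
    rw [h2]
    apply List.map_congr_left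
    intro t ht
    have ht' := List.mem_range.mp (List.mem_of_mem_filter ht)
    simp only [Function.comp_apply]
    have : ((pat.length - 1 + t : Nat) : Int) = (pat.length : Int) - 1 + t := by omega
    rw [this]
    ring

theorem pvCanon_sorted (txt pat : List Char) : (pvCanon txt pat).Pairwise (· ≤ ·) := by
  unfold pvCanon
  rw [List.pairwise_map]
  have h1 : (List.range txt.length).Pairwise (· < ·) := List.pairwise_lt_range
  exact (h1.sublist List.filter_sublist).imp (fun {a b} hab => by omega)

theorem pvSorted_getD_mono {pb : List Int} (hs : pb.Pairwise (· ≤ ·))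
    {m m' : Nat} (h : m ≤ m') (h' : m' < pb.length) :
    pb.getD m 0 ≤ pb.getD m' 0 := by
  rcases Nat.lt_or_eq_of_le h with h1 | h1
  · rw [List.getD_eq_getElem _ _ (lt_trans h1 h'), List.getD_eq_getElem _ _ h']
    exact List.pairwise_iff_getElem.mp hs m m' (lt_trans h1 h') h' h1
  · subst h1; rfl

theorem pvBisectCond_iff (pb : List Int) (k x : Int) (hs : pb.Pairwise (· ≤ ·)) :
    ((PySem.List.bisectLeft pb x < pb.length ∧
        pb.getD (PySem.List.bisectLeft pb x) 0 - x ≤ k) ∨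
      (0 < PySem.List.bisectLeft pb x ∧
        x - pb.getD (PySem.List.bisectLeft pb x - 1) 0 ≤ k)) ↔
    ∃ y ∈ pb, |x - y| ≤ k := by
  have habs : ∀ y : Int, |x - y| ≤ k ↔ x - k ≤ y ∧ y - x ≤ k := by
    intro y; rw [abs_le]; omega
  simp only [habs]
  obtain ⟨hle, hlt, hge⟩ := PySem.List.bisectLeft_spec pb x hs
  set i := PySem.List.bisectLeft pb x with hi
  constructor
  · rintro (⟨h1, h2⟩ | ⟨h1, h2⟩)
    · have hD : pb.getD i 0 = pb[i] := List.getD_eq_getElem _ _ h1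
      refine ⟨pb.getD i 0, ?_, ?_, h2⟩
      · rw [hD]; exact List.getElem_mem h1
      · have := hge i h1 (le_refl i)
        omega
    · have hm : i - 1 < pb.length := by omega
      have hD : pb.getD (i - 1) 0 = pb[i - 1] := List.getD_eq_getElem _ _ hm
      refine ⟨pb.getD (i - 1) 0, ?_, by omega, ?_⟩
      · rw [hD]; exact List.getElem_mem hm
      · have := hlt (i - 1) hm (by omega)
        omega
  · rintro ⟨y, hy, h1, h2⟩
    obtain ⟨m, hm, hym⟩ := List.mem_iff_getElem.mp hy
    have hmD : pb.getD m 0 = y := by rw [List.getD_eq_getElem _ _ hm, hym]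
    by_cases hmi : m < i
    · right
      have hm1 : i - 1 < pb.length := by omega
      have := pvSorted_getD_mono hs (show m ≤ i - 1 by omega) hm1
      exact ⟨by omega, by omega⟩
    · left
      have h3 : i < pb.length := by omega
      have := pvSorted_getD_mono hs (show i ≤ m by omega) hm
      exact ⟨h3, by omega⟩

theorem pvKmp_nil (pat : List Char) : pvKmp [] pat = [] := rfl

theorem pvOcc_nil (p : List Char) (hp : p ≠ []) : pvOcc [] p = [] := by
  unfold pvOcc
  rw [PySem.List.pyRange_one_eq_nil
    (by have := List.length_pos_of_ne_nil hp; simp; omega)]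
  rfl

theorem pvA_empty_s (a b : String) (k : Int) : beautifulIndices1 "" a b k = [] := by
  unfold beautifulIndices1
  rw [show ("" : String).toList = [] from rfl, pvKmp_nil]
  rfl

theorem pvB_empty_s (a b : String) (k : Int) (h : a ≠ "" ∨ b ≠ "") :
    beautifulIndices1_alt "" a b k = [] := by
  unfold beautifulIndices1_alt
  rw [show ("" : String).toList = [] from rfl]
  by_cases ha : a = ""
  · have hb : b ≠ "" := by tauto
    rw [pvOcc_nil b.toList (fun h' => hb (String.toList_eq_nil_iff.mp h'))]
    simp
  · rw [pvOcc_nil a.toList (fun h' => ha (String.toList_eq_nil_iff.mp h'))]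
    rfl

-- ===== VERDICT (by name: the statement is the Claim_ definition above) =====
theorem beautifulIndices1_spec : Claim_equal_beautifulIndices1 := by
  intro s a b k _ hpre
  unfold Spec_beautifulIndices1
  rcases hpre with ⟨ha, hb⟩ | ⟨hs, hab⟩
  case inr => subst hs; rw [pvA_empty_s, pvB_empty_s a b k hab]
  unfold beautifulIndices1 beautifulIndices1_alt
  have ha' : a.toList ≠ [] := fun h => ha (String.toList_eq_nil_iff.mp h)
  have hb' : b.toList ≠ [] := fun h => hb (String.toList_eq_nil_iff.mp h)
  rw [pvKmp_eq_canon s.toList a.toList ha', pvKmp_eq_canon s.toList b.toList hb',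
    pvOcc_eq_canon s.toList a.toList ha', pvOcc_eq_canon s.toList b.toList hb']
  rw [PySem.List.foldl_append_if_eq_filter]
  rw [List.nil_append]
  apply List.filter_congr
  intro x _
  rw [Bool.eq_iff_iff]
  simp only [Bool.or_eq_true, Bool.and_eq_true, decide_eq_true_eq, List.any_eq_true]
  exact pvBisectCond_iff (pvCanon s.toList b.toList) k x (pvCanon_sorted s.toList b.toList)
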